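-- pv_equiv track=rewrite | github.com/thisDotLucas/DataAnalysis | covid.py | create_structure_for_world_data
-- ===== SOURCE A (Python) =====
-- def create_structure_for_world_data(data): # skapar dictionary med data från covid_world_data.json filen , (key = världsdel, value = (key = land i världsdel, value= lista med alla datum för land))
--
--     our_dict = {}
--
--     for element in data['records']: #Ifall ny världsdel skapa en ny dict
--         if element["continentExp"] not in our_dict.keys():
--             our_dict[element["continentExp"]] = {}
--
--         if element["countriesAndTerritories"] not in our_dict[element["continentExp"]].keys(): #Ifall nytt land skapa en lista för det landet
--             our_dict[element["continentExp"]][element["countriesAndTerritories"]] = []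
--
--
--         our_dict[element["continentExp"]][element["countriesAndTerritories"]].append(element)
--
--
--     return our_dict
-- ===== SOURCE B (Python) =====
-- def create_structure_for_world_data(data):
--     # Group once by the composite (continent, country) key, then regroup the
--     # buckets into the nested dict (dicts preserve first-insertion order).
--     flat = {}
--     for element in data['records']:
--         key = (element["continentExp"], element["countriesAndTerritories"])
--         if key not in flat:
--             flat[key] = []
--         flat[key].append(element)
--     our_dict = {}
--     for (continent, country), elements in flat.items():
--         if continent not in our_dict:
--             our_dict[continent] = {}
--         our_dict[continent][country] = elements
--     return our_dict
-- ===== Notes on version B (the rewrite author's own statement) =====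
-- stated objective: alternative
-- what changed: B groups records once into a flat dict keyed by the composite (continent, country) pair and then regroups those buckets into the nested dict, instead of A's element-wise insertion into nested dicts.
import Mathlib
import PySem

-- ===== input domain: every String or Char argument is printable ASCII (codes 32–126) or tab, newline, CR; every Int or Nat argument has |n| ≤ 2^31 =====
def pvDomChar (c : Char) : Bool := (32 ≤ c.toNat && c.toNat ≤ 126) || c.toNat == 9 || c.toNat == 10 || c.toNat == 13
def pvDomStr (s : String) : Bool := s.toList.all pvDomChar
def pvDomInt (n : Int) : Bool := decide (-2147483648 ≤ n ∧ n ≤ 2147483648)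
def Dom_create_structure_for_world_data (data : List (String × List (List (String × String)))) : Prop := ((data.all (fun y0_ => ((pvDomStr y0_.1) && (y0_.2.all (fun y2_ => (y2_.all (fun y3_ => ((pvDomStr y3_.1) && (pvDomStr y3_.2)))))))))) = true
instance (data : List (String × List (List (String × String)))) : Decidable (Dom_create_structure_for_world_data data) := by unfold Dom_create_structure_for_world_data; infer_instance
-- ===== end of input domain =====

-- B builds a flat dict keyed by the composite (continent, country) pair and then regroups it
-- into the nested dict, instead of A's element-wise insertion into nested dicts (alternative decomposition).
-- Pre_ excludes exactly the inputs on which Python A raises KeyError (no 'records' key, or a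
-- record lacking 'continentExp'/'countriesAndTerritories'); B raises there as well.

-- ===== PORT A =====
-- element["k"]: first-match lookup in the association list (exact for dict inputs; Pre_ guarantees presence)
def pvGet (r : List (String × String)) (k : String) : String := (PySem.Dict.mk r).getD k ""

def pvRecords (data : List (String × List (List (String × String)))) : List (List (String × String)) :=
  (PySem.Dict.mk data).getD "records" []

def create_structure_for_world_data (data : List (String × List (List (String × String)))) : List (String × List (String × List (List (String × String)))) :=
  let our_dict : PySem.Dict String (PySem.Dict String (List (List (String × String)))) :=
    (pvRecords data).foldl (fun d element =>
      let c := pvGet element "continentExp"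
      let k := pvGet element "countriesAndTerritories"
      -- if element["continentExp"] not in our_dict.keys(): our_dict[...] = {}
      let d1 := if d.contains c then d else d.insert c PySem.Dict.empty
      -- if element["countriesAndTerritories"] not in our_dict[...].keys(): ... = []
      let inner := d1.getD c PySem.Dict.empty
      let inner1 := if inner.contains k then inner else inner.insert k []
      -- our_dict[...][...].append(element)
      d1.insert c (inner1.insert k (inner1.getD k [] ++ [element]))) PySem.Dict.empty
  our_dict.items.map (fun p => (p.1, p.2.items))

-- ===== PORT B =====
def create_structure_for_world_data_alt (data : List (String × List (List (String × String)))) : List (String × List (String × List (List (String × String)))) :=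
  let flat : PySem.Dict (String × String) (List (List (String × String))) :=
    (pvRecords data).foldl (fun d element =>
      let key := (pvGet element "continentExp", pvGet element "countriesAndTerritories")
      let d1 := if d.contains key then d else d.insert key []
      d1.insert key (d1.getD key [] ++ [element])) PySem.Dict.empty
  let our_dict : PySem.Dict String (PySem.Dict String (List (List (String × String)))) :=
    flat.items.foldl (fun d p =>
      let d1 := if d.contains p.1.1 then d else d.insert p.1.1 PySem.Dict.empty
      d1.insert p.1.1 ((d1.getD p.1.1 PySem.Dict.empty).insert p.1.2 p.2)) PySem.Dict.empty
  our_dict.items.map (fun p => (p.1, p.2.items))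

-- ===== PRECONDITION & SPEC =====
-- Pre_: exactly the inputs where Python A returns (KeyError otherwise): 'records' is a key of
-- data and every record carries both grouping keys.
def Pre_create_structure_for_world_data (data : List (String × List (List (String × String)))) : Prop :=
  "records" ∈ data.map Prod.fst ∧
  ∀ r ∈ (PySem.Dict.mk data).getD "records" [],
    "continentExp" ∈ r.map Prod.fst ∧ "countriesAndTerritories" ∈ r.map Prod.fst
instance (data : List (String × List (List (String × String)))) : Decidable (Pre_create_structure_for_world_data data) := by unfold Pre_create_structure_for_world_data; infer_instance

def pvWitness_create_structure_for_world_data : (List (String × List (List (String × String)))) :=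
  [("records", [[("continentExp", "Europe"), ("countriesAndTerritories", "Sweden"), ("cases", "7")]])]

def Spec_create_structure_for_world_data (data : List (String × List (List (String × String)))) (out : List (String × List (String × List (List (String × String))))) : Prop := out = create_structure_for_world_data_alt data
instance (data : List (String × List (List (String × String)))) (out : List (String × List (String × List (List (String × String))))) : Decidable (Spec_create_structure_for_world_data data out) := by
  unfold Spec_create_structure_for_world_data
  letI i1 : DecidableEq (List (List (String × String))) := inferInstance
  letI i2 : DecidableEq (List (String × List (List (String × String)))) := inferInstance
  letI i3 : DecidableEq (List (String × List (String × List (List (String × String))))) := inferInstance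
  infer_instance

-- ===== CLAIM (what is proved, stated in full; the proofs are below) =====
def Claim_equal_create_structure_for_world_data : Prop := ∀ (data : List (String × List (List (String × String)))), Dom_create_structure_for_world_data data → Pre_create_structure_for_world_data data → Spec_create_structure_for_world_data data (create_structure_for_world_data data)

-- ===== LEMMAS AND PROOFS =====

-- 'if absent insert default, then overwrite with f of the current value' IS Dict.modify
theorem pv_step_canon {κ ν : Type} [DecidableEq κ] [BEq κ] [LawfulBEq κ]
    (d : PySem.Dict κ ν) (c : κ) (d0 : ν) (f : ν → ν) :
    (let d1 := if d.contains c then d else d.insert c d0;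
     d1.insert c (f (d1.getD c d0))) = d.modify c d0 f := by
  show (if d.contains c then d else d.insert c d0).insert c
      (f ((if d.contains c then d else d.insert c d0).getD c d0)) = d.modify c d0 f
  by_cases h : d.contains c = true
  · simp [h, PySem.Dict.modify]
  · simp only [Bool.not_eq_true] at h
    simp [h, PySem.Dict.getD_insert_self, PySem.Dict.insert_insert_self,
      PySem.Dict.getD_of_not_contains, PySem.Dict.modify]

-- getD of a 'modify at key e' loop: only the elements whose key matches survive
theorem pv_getD_foldl_modify {α κ ν : Type} [DecidableEq κ] [BEq κ] [LawfulBEq κ]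
    (l : List α) (key : α → κ) (d0 : ν) (f : α → ν → ν) (d : PySem.Dict κ ν) (c : κ) :
    (l.foldl (fun d e => d.modify (key e) d0 (f e)) d).getD c d0
      = (l.filter (fun e => key e == c)).foldl (fun v e => f e v) (d.getD c d0) := by
  induction l generalizing d with
  | nil => rfl
  | cons e t ih =>
    simp only [List.foldl_cons, List.filter_cons]
    by_cases h : key e = c
    · simp [h, ih, PySem.Dict.getD_modify_self]
    · have h2 : ¬ c = key e := fun hh => h hh.symm
      have h3 : (key e == c) = false := by simp [h]
      simp [h3, ih, PySem.Dict.getD_modify, h2]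

-- the items of a grouping loop: first occurrences of the keys, each with its folded bucket
theorem pv_group_items {α κ ν : Type} [DecidableEq κ] [BEq κ] [LawfulBEq κ]
    (l : List α) (key : α → κ) (d0 : ν) (f : α → ν → ν) :
    (l.foldl (fun d e => d.modify (key e) d0 (f e)) PySem.Dict.empty).items
      = (PySem.Set.ofList (l.map key)).map
          (fun c => (c, (l.filter (fun e => key e == c)).foldl (fun v e => f e v) d0)) := by
  have hk : (l.foldl (fun d e => d.modify (key e) d0 (f e)) PySem.Dict.empty).keys
      = PySem.Set.ofList (l.map key) := by
    rw [PySem.Dict.keys_foldl_modify_key]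
    simp [PySem.Set.update_nil_left]
  have hnd : (l.foldl (fun d e => d.modify (key e) d0 (f e)) PySem.Dict.empty).keys.Nodup := by
    rw [hk]; exact PySem.Set.nodup_ofList _
  rw [PySem.Dict.items_eq_map_keys _ hnd d0, hk]
  refine List.map_congr_left (fun c hc => ?_)
  rw [pv_getD_foldl_modify, PySem.Dict.getD_empty]

-- ofList commutes with an injective map
theorem pv_ofList_map_of_injective {α β : Type} [BEq α] [LawfulBEq α] [BEq β] [LawfulBEq β]
    (f : α → β) (hf : Function.Injective f) (xs : List α) :
    PySem.Set.ofList (xs.map f) = (PySem.Set.ofList xs).map f := by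
  induction xs using List.reverseRecOn with
  | nil => rfl
  | append_singleton t x ih =>
    simp only [List.map_append, List.map_cons, List.map_nil,
      PySem.Set.ofList_append_singleton, ih, PySem.Set.add_eq_ite]
    by_cases h : x ∈ PySem.Set.ofList t
    · simp [h, List.mem_map.mpr ⟨x, h, rfl⟩]
    · have hx : f x ∉ (PySem.Set.ofList t).map f := by
        intro hm; rcases List.mem_map.mp hm with ⟨y, hy, he⟩
        exact h (hf he ▸ hy)
      simp [h, hx]

-- dedup of a map of a dedup is dedup of the map
theorem pv_ofList_map_ofList {α β : Type} [BEq α] [LawfulBEq α] [BEq β] [LawfulBEq β]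
    (f : α → β) (xs : List α) :
    PySem.Set.ofList ((PySem.Set.ofList xs).map f) = PySem.Set.ofList (xs.map f) := by
  induction xs using List.reverseRecOn with
  | nil => rfl
  | append_singleton t x ih =>
    rw [PySem.Set.ofList_append_singleton, PySem.Set.add_eq_ite, List.map_append,
      List.map_cons, List.map_nil, PySem.Set.ofList_append_singleton, PySem.Set.add_eq_ite]
    by_cases h : x ∈ PySem.Set.ofList t
    · have hx : f x ∈ PySem.Set.ofList (t.map f) := by
        rw [PySem.Set.mem_ofList]
        exact List.mem_map_of_mem (by rwa [PySem.Set.mem_ofList] at h)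
      simp [h, ih, hx]
    · simp [h, ih, PySem.Set.ofList_append_singleton, PySem.Set.add_eq_ite]

-- filter commutes with ofList
theorem pv_filter_ofList {α : Type} [BEq α] [LawfulBEq α]
    (p : α → Bool) (xs : List α) :
    (PySem.Set.ofList xs).filter p = PySem.Set.ofList (xs.filter p) := by
  induction xs using List.reverseRecOn with
  | nil => rfl
  | append_singleton t x ih =>
    simp only [List.filter_append, PySem.Set.ofList_append_singleton, PySem.Set.add_eq_ite]
    by_cases hp : p x = true
    · simp only [List.filter_cons, hp, if_pos, List.filter_nil]
      by_cases h : x ∈ PySem.Set.ofList t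
      · have hx : x ∈ PySem.Set.ofList (t.filter p) := by
          rw [PySem.Set.mem_ofList] at h ⊢; exact List.mem_filter.mpr ⟨h, hp⟩
        simp [h, ih, PySem.Set.ofList_append_singleton, hx]
      · have hx : x ∉ PySem.Set.ofList (t.filter p) := by
          rw [PySem.Set.mem_ofList] at h ⊢; exact fun hm => h (List.mem_filter.mp hm).1
        simp [h, ih, hp, PySem.Set.ofList_append_singleton, hx]
    · have hp2 : p x = false := by simpa using hp
      simp only [List.filter_cons, hp2, List.filter_nil]
      by_cases h : x ∈ PySem.Set.ofList t
      · simp [h, ih]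
      · simp [h, ih, hp2]


-- per-continent: B's regrouped bucket list equals A's nested country grouping
theorem pv_inner_eq {α : Type} [DecidableEq α] (l : List α) (kC kK : α → String) (c : String) :
    ((((PySem.Set.ofList (l.map (fun e => (kC e, kK e)))).map
          (fun q => (q, l.filter (fun e => (kC e, kK e) == q)))).filter
        (fun p => p.1.1 == c)).foldl
      (fun v p => v.insert p.1.2 p.2)
      (PySem.Dict.empty : PySem.Dict String (List α))).items
    = (PySem.Set.ofList ((l.filter (fun e => kC e == c)).map kK)).map
        (fun k => (k, (l.filter (fun e => kC e == c)).filter (fun e => kK e == k))) := by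
  have h1 : ((PySem.Set.ofList (l.map (fun e => (kC e, kK e)))).map
        (fun q => (q, l.filter (fun e => (kC e, kK e) == q)))).filter (fun p => p.1.1 == c)
      = ((PySem.Set.ofList (l.map (fun e => (kC e, kK e)))).filter (fun q => q.1 == c)).map
        (fun q => (q, l.filter (fun e => (kC e, kK e) == q))) := by
    rw [List.filter_map]; rfl
  have h2 : (PySem.Set.ofList (l.map (fun e => (kC e, kK e)))).filter (fun q => q.1 == c)
      = (PySem.Set.ofList ((l.filter (fun e => kC e == c)).map kK)).map (fun k => (c, k)) := by
    rw [pv_filter_ofList, List.filter_map]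
    have h3 : (l.filter ((fun (q : String × String) => q.1 == c) ∘ (fun e => (kC e, kK e)))).map
          (fun e => (kC e, kK e))
        = ((l.filter (fun e => kC e == c)).map kK).map (fun k => (c, k)) := by
      rw [List.map_map]
      show (l.filter (fun e => kC e == c)).map (fun e => (kC e, kK e))
          = (l.filter (fun e => kC e == c)).map ((fun k => (c, k)) ∘ kK)
      refine List.map_congr_left (fun e he => ?_)
      have hce : kC e = c := by
        have h4 := (List.mem_filter.mp he).2
        simp at h4
        exact h4
      exact congrArg (fun x => (x, kK e)) hce
    rw [h3, pv_ofList_map_of_injective _ (fun a b h => by simpa using h)]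
  rw [h1, h2, List.map_map]
  have hit := PySem.Dict.items_foldl_insert_fresh
      (l := (PySem.Set.ofList ((l.filter (fun e => kC e == c)).map kK)).map
        ((fun q => (q, l.filter (fun e => (kC e, kK e) == q))) ∘ (fun k => (c, k))))
      (k := fun q => q.1.2) (v := fun q => q.2)
      (PySem.Dict.empty : PySem.Dict String (List α))
      (fun a _ => PySem.Dict.contains_empty _)
      (by
        rw [List.map_map]
        show ((PySem.Set.ofList ((l.filter (fun e => kC e == c)).map kK)).map (fun k => k)).Nodup
        simp only [List.map_id_fun', id]
        exact PySem.Set.nodup_ofList ((l.filter (fun e => kC e == c)).map kK))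
  refine hit.trans ?_
  rw [List.map_map]
  have hemp : (PySem.Dict.empty : PySem.Dict String (List α)).items = [] := rfl
  rw [hemp, List.nil_append]
  refine List.map_congr_left (fun k hk => ?_)
  show (k, l.filter (fun e => (kC e, kK e) == (c, k)))
      = (k, (l.filter (fun e => kC e == c)).filter (fun e => kK e == k))
  refine congrArg (fun t => (k, t)) ?_
  rw [List.filter_filter]
  refine List.filter_congr (fun e he => ?_)
  rw [show ((kC e, kK e) == (c, k)) = (kC e == c && kK e == k) from rfl, Bool.and_comm]

-- the two ports agree on every input
theorem pv_ports_eq (data : List (String × List (List (String × String)))) :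
    create_structure_for_world_data data = create_structure_for_world_data_alt data := by
  unfold create_structure_for_world_data create_structure_for_world_data_alt
  have hA : (fun (d : PySem.Dict String (PySem.Dict String (List (List (String × String))))) element =>
      let c := pvGet element "continentExp"
      let k := pvGet element "countriesAndTerritories"
      let d1 := if d.contains c then d else d.insert c PySem.Dict.empty
      let inner := d1.getD c PySem.Dict.empty
      let inner1 := if inner.contains k then inner else inner.insert k []
      d1.insert c (inner1.insert k (inner1.getD k [] ++ [element])))
      = fun d element => d.modify (pvGet element "continentExp") PySem.Dict.empty
          (fun inner => inner.modify (pvGet element "countriesAndTerritories") []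
            (fun v => v ++ [element])) := by
    funext d e
    refine Eq.trans (pv_step_canon d (pvGet e "continentExp") PySem.Dict.empty
      (fun inner =>
        (if inner.contains (pvGet e "countriesAndTerritories") then inner
         else inner.insert (pvGet e "countriesAndTerritories") []).insert
          (pvGet e "countriesAndTerritories")
          ((if inner.contains (pvGet e "countriesAndTerritories") then inner
            else inner.insert (pvGet e "countriesAndTerritories") []).getD
            (pvGet e "countriesAndTerritories") [] ++ [e]))) ?_
    congr 1
    funext inner
    exact pv_step_canon inner (pvGet e "countriesAndTerritories") [] (fun v => v ++ [e])
  have hBflat : (fun (d : PySem.Dict (String × String) (List (List (String × String)))) element =>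
      let key := (pvGet element "continentExp", pvGet element "countriesAndTerritories")
      let d1 := if d.contains key then d else d.insert key []
      d1.insert key (d1.getD key [] ++ [element]))
      = fun d element => d.modify (pvGet element "continentExp", pvGet element "countriesAndTerritories") []
          (fun v => v ++ [element]) := by
    funext d e
    exact pv_step_canon d (pvGet e "continentExp", pvGet e "countriesAndTerritories") []
      (fun v => v ++ [e])
  have hBnest : (fun (d : PySem.Dict String (PySem.Dict String (List (List (String × String)))))
      (p : (String × String) × List (List (String × String))) =>
      let d1 := if d.contains p.1.1 then d else d.insert p.1.1 PySem.Dict.empty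
      d1.insert p.1.1 ((d1.getD p.1.1 PySem.Dict.empty).insert p.1.2 p.2))
      = fun d p => d.modify p.1.1 PySem.Dict.empty (fun inner => inner.insert p.1.2 p.2) := by
    funext d p
    exact pv_step_canon d p.1.1 PySem.Dict.empty (fun inner => inner.insert p.1.2 p.2)
  simp only [hA, hBflat, hBnest]
  rw [pv_group_items, pv_group_items, pv_group_items]
  simp only [List.map_map]
  rw [pv_ofList_map_ofList]
  simp only [List.map_map]
  refine List.map_congr_left (fun c hc => ?_)
  refine congrArg (fun t => (c, t)) ?_
  rw [pv_group_items]
  simp only [PySem.List.foldl_append_singleton, List.nil_append]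
  exact (pv_inner_eq (pvRecords data) (fun e => pvGet e "continentExp")
    (fun e => pvGet e "countriesAndTerritories") c).symm

-- ===== VERDICT (by name: the statement is the Claim_ definition above) =====
theorem create_structure_for_world_data_spec : Claim_equal_create_structure_for_world_data := by
  intro data _ _
  unfold Spec_create_structure_for_world_data
  exact pv_ports_eq data
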